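-- pv_equiv track=rewrite | github.com/Lemmah/pyWorkSpace | code32/fightTheMonsters.py | getMaxMonsters
-- ===== SOURCE A (Python) =====
-- def getMaxMonsters(n, hit, t, h):
--     """This function returns the maximum number of monsters Jason can kill in t seconds"""
--     # keeping track of the remaining time
--     remainingSeconds = t
--     # blasting monsters only when time is greater than 0
--     while remainingSeconds > 0:
--         # checking each monster's health
--         vulnerableMonster = min([health for health in h if health > 0])
--         # getting the position of the vulnerable monster
--         vulnerableMonsterPos = h.index(vulnerableMonster)
--         # blasting the monster
--         h[vulnerableMonsterPos] = vulnerableMonster - hit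
--         remainingSeconds -= 1
--     # counting dead monsters
--     deadMonsters = len([health for health in h if health <= 0])
--     return deadMonsters
-- ===== SOURCE B (Python) =====
-- def getMaxMonsters(n, hit, t, h):
--     """Greedy closed-form: kill cost per monster is ceil(health/hit); sort costs and
--     count the prefix that fits in t seconds.  (Does not mutate h, unlike A.)"""
--     dead = len([x for x in h if x <= 0])
--     if t <= 0 or hit <= 0:
--         return dead
--     costs = sorted(-(-x // hit) for x in h if x > 0)
--     kills = 0
--     rem = t
--     for c in costs:
--         if c > rem:
--             break
--         rem -= c
--         kills += 1
--     return dead + kills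
-- ===== Notes on version B (the rewrite author's own statement) =====
-- stated objective: faster
-- what changed: Replaces the t-iteration one-hit-per-second simulation by a greedy closed form: each monster's kill cost is ceil(health/hit), costs are sorted and the longest prefix fitting in t is counted.
-- crash fix: When t exceeds the total hits needed to kill every monster (or t>0 with no monster alive), A raises ValueError on min of an empty list; B returns the count of monsters it can kill (all of them). — e.g. on getMaxMonsters(1, 1, 2, [1]): A raises ValueError, B returns 1
import Mathlib
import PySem

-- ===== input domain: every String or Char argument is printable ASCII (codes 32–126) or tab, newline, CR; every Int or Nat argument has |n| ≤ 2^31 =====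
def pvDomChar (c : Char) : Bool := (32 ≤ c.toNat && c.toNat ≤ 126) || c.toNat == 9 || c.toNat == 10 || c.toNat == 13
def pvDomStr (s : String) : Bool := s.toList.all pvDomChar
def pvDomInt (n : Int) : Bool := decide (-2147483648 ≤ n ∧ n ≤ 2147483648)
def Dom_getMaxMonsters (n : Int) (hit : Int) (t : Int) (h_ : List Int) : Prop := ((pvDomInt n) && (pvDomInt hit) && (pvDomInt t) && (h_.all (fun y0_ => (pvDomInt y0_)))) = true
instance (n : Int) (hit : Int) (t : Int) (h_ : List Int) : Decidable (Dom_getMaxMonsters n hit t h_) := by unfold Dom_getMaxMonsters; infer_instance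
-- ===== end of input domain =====

-- B replaces A's one-hit-per-second simulation by sorting the per-monster kill costs
-- ceil(health/hit) and counting the prefix that fits in t (objective: faster).
-- A mutates its list argument h in place; B does not — the equivalence proved here is
-- about the RETURN value only.

-- ===== PORT A =====
def pyLoopA (hit : Int) : Nat → List Int → List Int
  | 0, h => h
  | Nat.succ k, h =>
    match PySem.List.min? (h.filter (fun x => decide (0 < x))) (fun x => x) with
    | none => h            -- Python: min([]) raises ValueError; Pre_ excludes this
    | some m =>
      match PySem.List.index? h m with
      | none => h          -- unreachable: the min is a member of h
      | some i => pyLoopA hit k (h.set i (m - hit))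

def getMaxMonsters (n : Int) (hit : Int) (t : Int) (h_ : List Int) : Int :=
  (((pyLoopA hit t.toNat h_).filter (fun x => decide (x ≤ 0))).length : Int)

-- ===== PORT B =====
def bCost (hit : Int) (x : Int) : Int := -(PySem.Int.floordiv (-x) hit)

def bTakeKills : List Int → Int → Int
  | [], _ => 0
  | c :: cs, rem => if rem < c then 0 else 1 + bTakeKills cs (rem - c)

def getMaxMonsters_alt (n : Int) (hit : Int) (t : Int) (h_ : List Int) : Int :=
  let dead : Int := ((h_.filter (fun x => decide (x ≤ 0))).length : Int)
  if t ≤ 0 ∨ hit ≤ 0 then dead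
  else dead + bTakeKills
      (PySem.List.sorted ((h_.filter (fun x => decide (0 < x))).map (bCost hit)) (fun x => x) false) t

-- ===== PRECONDITION & SPEC =====
-- total number of hits needed to kill every currently-alive monster (closed form)
def pvNeeded (hit : Int) (h : List Int) : Int :=
  ((h.filter (fun x => decide (0 < x))).map (fun x => -(PySem.Int.floordiv (-x) hit))).sum

-- Pre_ excludes exactly the inputs on which A raises ValueError (min of an empty list):
-- t > 0 seconds remain but no monster has positive health (hit ≤ 0 keeps healths positive;
-- hit > 0 kills everything after pvNeeded hits).
def Pre_getMaxMonsters (n : Int) (hit : Int) (t : Int) (h_ : List Int) : Prop :=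
  t ≤ 0 ∨ (0 < hit ∧ t ≤ pvNeeded hit h_) ∨ (hit ≤ 0 ∧ ∃ x ∈ h_, 0 < x)
instance (n : Int) (hit : Int) (t : Int) (h_ : List Int) : Decidable (Pre_getMaxMonsters n hit t h_) := by
  unfold Pre_getMaxMonsters; infer_instance

def pvWitness_getMaxMonsters : Int × Int × Int × List Int := (2, 3, 2, [5, -1])

-- When t exceeds the total hits needed to kill every monster (or t > 0 with no monster
-- alive and hit ≤ 0), A raises ValueError on min([]); B returns the number of monsters killable.
def Raises_getMaxMonsters (n : Int) (hit : Int) (t : Int) (h_ : List Int) : Prop :=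
  0 < t ∧ ((0 < hit ∧ pvNeeded hit h_ < t) ∨ (hit ≤ 0 ∧ ∀ x ∈ h_, x ≤ 0))
instance (n : Int) (hit : Int) (t : Int) (h_ : List Int) : Decidable (Raises_getMaxMonsters n hit t h_) := by
  unfold Raises_getMaxMonsters; infer_instance

def pvRaiseWitness_getMaxMonsters : Int × Int × Int × List Int := (1, 1, 2, [1])
def pvRaiseWitnessOut_getMaxMonsters : Int := 1

def Spec_getMaxMonsters (n : Int) (hit : Int) (t : Int) (h_ : List Int) (out : Int) : Prop :=
  out = getMaxMonsters_alt n hit t h_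
instance (n : Int) (hit : Int) (t : Int) (h_ : List Int) (out : Int) : Decidable (Spec_getMaxMonsters n hit t h_ out) := by
  unfold Spec_getMaxMonsters; infer_instance

-- ===== CLAIM (what is proved, stated in full; the proofs are below) =====
def Claim_equal_getMaxMonsters : Prop := ∀ (n : Int) (hit : Int) (t : Int) (h_ : List Int), Dom_getMaxMonsters n hit t h_ → Pre_getMaxMonsters n hit t h_ → Spec_getMaxMonsters n hit t h_ (getMaxMonsters n hit t h_)

def Claim_raises_getMaxMonsters : Prop := (∀ (n : Int) (hit : Int) (t : Int) (h_ : List Int), Dom_getMaxMonsters n hit t h_ → Raises_getMaxMonsters n hit t h_ → ¬ Pre_getMaxMonsters n hit t h_) ∧ (Dom_getMaxMonsters (pvRaiseWitness_getMaxMonsters.1) (pvRaiseWitness_getMaxMonsters.2.1) (pvRaiseWitness_getMaxMonsters.2.2.1) (pvRaiseWitness_getMaxMonsters.2.2.2) ∧ Raises_getMaxMonsters (pvRaiseWitness_getMaxMonsters.1) (pvRaiseWitness_getMaxMonsters.2.1) (pvRaiseWitness_getMaxMonsters.2.2.1) (pvRaiseWitness_getMaxMonsters.2.2.2) ∧ getMaxMonsters_alt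 (pvRaiseWitness_getMaxMonsters.1) (pvRaiseWitness_getMaxMonsters.2.1) (pvRaiseWitness_getMaxMonsters.2.2.1) (pvRaiseWitness_getMaxMonsters.2.2.2) = pvRaiseWitnessOut_getMaxMonsters)

-- ===== LEMMAS AND PROOFS =====

-- ceiling-division bounds: for 0 < hit, (bCost hit m - 1) * hit < m ≤ bCost hit m * hit
theorem bCost_bounds {hit m : Int} (hhit : 0 < hit) :
    (bCost hit m - 1) * hit < m ∧ m ≤ bCost hit m * hit :=
  (PySem.Int.neg_floordiv_neg_eq_iff_of_pos hhit).mp rfl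

theorem bCost_pos {hit m : Int} (hhit : 0 < hit) (hm : 0 < m) : 1 ≤ bCost hit m := by
  rcases bCost_bounds (m := m) hhit with ⟨h1, h2⟩
  by_contra hc
  push_neg at hc
  nlinarith

theorem bCost_mono {hit a b : Int} (hhit : 0 < hit) (hab : a ≤ b) : bCost hit a ≤ bCost hit b := by
  rcases bCost_bounds (m := a) hhit with ⟨ha1, ha2⟩
  rcases bCost_bounds (m := b) hhit with ⟨hb1, hb2⟩
  by_contra hc
  push_neg at hc
  have : bCost hit b ≤ bCost hit a - 1 := by omega
  nlinarith

-- list surgery at one index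
theorem list_decomp {l : List Int} {i : Nat} (hi : i < l.length) :
    l = l.take i ++ l[i] :: l.drop (i+1) := by
  conv_lhs => rw [← List.take_append_drop i l]
  rw [List.getElem_cons_drop]

theorem set_decomp {l : List Int} {i : Nat} (hi : i < l.length) (a : Int) :
    l.set i a = l.take i ++ a :: l.drop (i+1) := by
  rw [List.set_eq_take_append_cons_drop, if_pos hi]

-- min? of an Int list is the value that is a member and a lower bound
theorem min?_eq_of {l : List Int} {v : Int} (hv : v ∈ l) (hmin : ∀ y ∈ l, v ≤ y) :
    PySem.List.min? l (fun x => x) = some v := by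
  cases hl : PySem.List.min? l (fun x => x) with
  | none =>
      rw [PySem.List.min?_eq_none_iff] at hl
      subst hl; cases hv
  | some u =>
      have hu : u ∈ l := PySem.List.min?_mem hl
      have h1 : u ≤ v := PySem.List.min?_isMin hl v hv
      exact congrArg some (le_antisymm h1 (hmin u hu))

theorem index?_eq_of {l : List Int} {v : Int} {i : Nat} (hi : i < l.length) (hgi : l[i] = v)
    (hfirst : ∀ y ∈ l.take i, y ≠ v) : PySem.List.index? l v = some i := by
  rw [PySem.List.index?_eq_some_iff]
  refine ⟨l.take i, l.drop (i+1), ?_, ?_, ?_⟩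
  · rw [← hgi]; exact list_decomp hi
  · simp [Nat.le_of_lt hi]
  · intro hmem; exact hfirst v hmem rfl

theorem pyLoopA_succ (hit : Int) (k : Nat) (h : List Int) {m : Int} {i : Nat}
    (hmin : PySem.List.min? (h.filter (fun x => decide (0 < x))) (fun x => x) = some m)
    (hidx : PySem.List.index? h m = some i) :
    pyLoopA hit (k+1) h = pyLoopA hit k (h.set i (m - hit)) := by
  simp only [pyLoopA, hmin, hidx]

-- extraction of the minimum-health monster and its first index
theorem extract (h : List Int) (hne : h.filter (fun x => decide (0 < x)) ≠ []) :
    ∃ (m : Int) (i : Nat), ∃ (hi : i < h.length),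
      PySem.List.min? (h.filter (fun x => decide (0 < x))) (fun x => x) = some m ∧
      PySem.List.index? h m = some i ∧ h[i] = m ∧ 0 < m ∧
      (∀ y ∈ h.filter (fun x => decide (0 < x)), m ≤ y) ∧
      (∀ y ∈ h.take i, y ≠ m) := by
  cases hl : PySem.List.min? (h.filter (fun x => decide (0 < x))) (fun x => x) with
  | none =>
      rw [PySem.List.min?_eq_none_iff] at hl
      exact absurd hl hne
  | some m =>
      have hmF : m ∈ h.filter (fun x => decide (0 < x)) := PySem.List.min?_mem hl
      have hmh : m ∈ h := (List.mem_filter.mp hmF).1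
      have hmpos : 0 < m := by simpa using (List.mem_filter.mp hmF).2
      cases hidx : PySem.List.index? h m with
      | none =>
          rw [PySem.List.index?_eq_none_iff] at hidx
          exact absurd hmh hidx
      | some i =>
          obtain ⟨hi, hgi, hfst⟩ := PySem.List.getElem_of_index?_eq_some hidx
          refine ⟨m, i, hi, rfl, hidx, hgi, hmpos, fun y hy => PySem.List.min?_isMin hl y hy, ?_⟩
          intro y hy heq
          obtain ⟨j, hj, hjy⟩ := List.getElem_of_mem hy
          have hj' : j < i := by simp [List.length_take] at hj; omega
          rw [List.getElem_take] at hjy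
          exact hfst j hj' (hjy.trans heq)

-- counting lemmas for a single in-place update
theorem dead_set_pos {h : List Int} {i : Nat} (hi : i < h.length) {v : Int}
    (hold : 0 < h[i]) (hnew : 0 < v) :
    ((h.set i v).filter (fun x => decide (x ≤ 0))).length
      = (h.filter (fun x => decide (x ≤ 0))).length := by
  conv_rhs => rw [list_decomp hi]
  rw [set_decomp hi v]
  simp only [List.filter_append, List.filter_cons, List.length_append]
  simp [show ¬(v ≤ 0) by omega, show ¬(h[i] ≤ 0) by omega]

theorem dead_set_dead {h : List Int} {i : Nat} (hi : i < h.length) {v : Int}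
    (hold : 0 < h[i]) (hnew : v ≤ 0) :
    ((h.set i v).filter (fun x => decide (x ≤ 0))).length
      = (h.filter (fun x => decide (x ≤ 0))).length + 1 := by
  conv_rhs => rw [list_decomp hi]
  rw [set_decomp hi v]
  simp only [List.filter_append, List.filter_cons, List.length_append]
  simp [hnew, show ¬(h[i] ≤ 0) by omega]
  omega

theorem pos_decomp {h : List Int} {i : Nat} (hi : i < h.length) (hold : 0 < h[i]) :
    h.filter (fun x => decide (0 < x))
      = (h.take i).filter (fun x => decide (0 < x))
        ++ h[i] :: (h.drop (i+1)).filter (fun x => decide (0 < x)) := by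
  conv_lhs => rw [list_decomp hi]
  simp only [List.filter_append, List.filter_cons]
  simp [hold]

theorem pos_set_dead {h : List Int} {i : Nat} (hi : i < h.length) {v : Int} (hnew : v ≤ 0) :
    (h.set i v).filter (fun x => decide (0 < x))
      = (h.take i).filter (fun x => decide (0 < x))
        ++ (h.drop (i+1)).filter (fun x => decide (0 < x)) := by
  rw [set_decomp hi v]
  simp only [List.filter_append, List.filter_cons]
  simp [show ¬(0 < v) by omega]

-- the simulation, inside the block that kills one monster
theorem inblock (hit : Int) (hhit : 0 < hit) (h : List Int) (m : Int) (i : Nat)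
    (hi : i < h.length) (hgi : h[i] = m) (hmpos : 0 < m)
    (hmin : ∀ y ∈ h.filter (fun x => decide (0 < x)), m ≤ y)
    (hfirst : ∀ y ∈ h.take i, y ≠ m) :
    ∀ (j s : Nat), j ≤ s → (∀ jj : Nat, jj < j → 0 < m - (jj : Int) * hit) →
      pyLoopA hit s h = pyLoopA hit (s - j) (h.set i (m - (j : Int) * hit)) := by
  intro j
  induction j with
  | zero =>
      intro s _ _
      have h00 : h.set i (m - ((0 : Nat) : Int) * hit) = h := by
        rw [show m - ((0 : Nat) : Int) * hit = m by push_cast; ring, ← hgi, List.set_getElem_self]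
      rw [h00, Nat.sub_zero]
  | succ j ihj =>
      intro s hjs hposj
      have hrec := ihj s (by omega) (fun jj hjj => hposj jj (by omega))
      set v : Int := m - (j : Int) * hit with hv
      have hvpos : 0 < v := hposj j (by omega)
      set g : List Int := h.set i v with hg
      have hglen : i < g.length := by simpa [hg] using hi
      have hgdec : g = h.take i ++ v :: h.drop (i+1) := set_decomp hi v
      have hgv : g[i] = v := by simp [hg]
      have hmemg : ∀ y ∈ g, y = v ∨ y ∈ h := by
        intro y hy
        rw [hgdec] at hy
        rcases List.mem_append.mp hy with hy | hy
        · exact Or.inr (List.mem_of_mem_take hy)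
        · rcases List.mem_cons.mp hy with hy | hy
          · exact Or.inl hy
          · exact Or.inr (List.mem_of_mem_drop hy)
      have hvlem : v ≤ m := by
        have h0j : (0 : Int) ≤ (j : Int) * hit := mul_nonneg (by positivity) hhit.le
        rw [hv]; linarith
      have hming : PySem.List.min? (g.filter (fun x => decide (0 < x))) (fun x => x) = some v := by
        apply min?_eq_of
        · exact List.mem_filter.mpr ⟨hgv ▸ List.getElem_mem hglen, by simpa using hvpos⟩
        · intro y hy
          obtain ⟨hyg, hypos⟩ := List.mem_filter.mp hy
          have hypos' : 0 < y := by simpa using hypos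
          rcases hmemg y hyg with rfl | hyh
          · exact le_refl _
          · exact hvlem.trans (hmin y (List.mem_filter.mpr ⟨hyh, by simpa using hypos'⟩))
      have hgtake : g.take i = h.take i := by
        rw [hgdec, List.take_append_of_le_length (by simp [Nat.le_of_lt hi]),
          List.take_take]
        simp [Nat.le_of_lt hi, List.take_take]
      have hidxg : PySem.List.index? g v = some i := by
        apply index?_eq_of hglen hgv
        rw [hgtake]
        intro y hy heq
        rcases Nat.eq_zero_or_pos j with rfl | hjpos
        · have hvm : v = m := by rw [hv]; push_cast; ring
          exact hfirst y hy (heq.trans hvm)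
        · have hyh : y ∈ h := List.mem_of_mem_take hy
          have hvm : v < m := by
            have h1 : (1 : Int) ≤ (j : Int) := by exact_mod_cast hjpos
            rw [hv]; nlinarith
          rcases le_or_gt y 0 with hy0 | hy0
          · have : 0 < y := heq ▸ hvpos
            omega
          · have := hmin y (List.mem_filter.mpr ⟨hyh, by simpa using hy0⟩)
            omega
      have hstep : s - j = (s - (j+1)) + 1 := by omega
      rw [hrec, hstep, pyLoopA_succ hit _ g hming hidxg]
      congr 1
      rw [hg, List.set_set]
      congr 1
      push_cast
      ring

-- head of the sorted cost list bounds bTakeKills below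
theorem takeKills_zero {l : List Int} {r : Int} (hl : ∀ y ∈ l, r < y) :
    bTakeKills l r = 0 := by
  cases l with
  | nil => rfl
  | cons c cs => rw [bTakeKills, if_pos (hl c (List.mem_cons_self ..))]

-- every cost of a live monster is at least bCost hit m when m is the minimum health
theorem sorted_mem_cost_le {hit m : Int} (hhit : 0 < hit) {h : List Int}
    (hmin : ∀ y ∈ h.filter (fun x => decide (0 < x)), m ≤ y) :
    ∀ y ∈ PySem.List.sorted ((h.filter (fun x => decide (0 < x))).map (bCost hit)) (fun x => x) false,
      bCost hit m ≤ y := by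
  intro y hy
  rw [PySem.List.mem_sorted] at hy
  obtain ⟨x, hx, rfl⟩ := List.mem_map.mp hy
  exact bCost_mono hhit (hmin x hx)

theorem main_sim (hit : Int) (hhit : 0 < hit) :
    ∀ (s : Nat) (h : List Int), (s : Int) ≤ pvNeeded hit h →
      (((pyLoopA hit s h).filter (fun x => decide (x ≤ 0))).length : Int)
        = ((h.filter (fun x => decide (x ≤ 0))).length : Int)
          + bTakeKills (PySem.List.sorted ((h.filter (fun x => decide (0 < x))).map (bCost hit)) (fun x => x) false) (s : Int) := by
  intro s
  induction s using Nat.strong_induction_on with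
  | _ s ih =>
    intro h hs
    rcases Nat.eq_zero_or_pos s with rfl | hspos
    · have h0 : ∀ y ∈ PySem.List.sorted ((h.filter (fun x => decide (0 < x))).map (bCost hit)) (fun x => x) false, (0 : Int) < y := by
        intro y hy
        rw [PySem.List.mem_sorted] at hy
        obtain ⟨x, hx, rfl⟩ := List.mem_map.mp hy
        have : 0 < x := by simpa using (List.mem_filter.mp hx).2
        have := bCost_pos hhit this
        omega
      simp only [pyLoopA, Nat.cast_zero]
      rw [takeKills_zero h0, add_zero]
    · have hne : h.filter (fun x => decide (0 < x)) ≠ [] := by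
        intro hnil
        rw [pvNeeded, hnil] at hs
        simp at hs
        omega
      obtain ⟨m, i, hi, hminEq, hidx, hgi, hmpos, hmin, hfirst⟩ := extract h hne
      set c : Int := bCost hit m with hc
      obtain ⟨hcb1, hcb2⟩ := bCost_bounds (m := m) hhit
      have hc1 : 1 ≤ c := bCost_pos hhit hmpos
      have hcast : ((c.toNat : Int)) = c := Int.toNat_of_nonneg (by omega)
      by_cases hsc : s < c.toNat
      · -- not enough time to kill even the weakest monster
        have hsint : (s : Int) < c := by
          rw [← hcast]; exact_mod_cast hsc
        have hposall : ∀ jj : Nat, jj < s → 0 < m - (jj : Int) * hit := by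
          intro jj hjj
          have h1 : (jj : Int) ≤ c - 1 := by
            have : (jj : Int) < (s : Int) := by exact_mod_cast hjj
            omega
          have h2 : (jj : Int) * hit ≤ (c - 1) * hit := mul_le_mul_of_nonneg_right h1 hhit.le
          rw [hc] at h2
          linarith
        have hblock := inblock hit hhit h m i hi hgi hmpos hmin hfirst s s (le_refl _) hposall
        rw [Nat.sub_self] at hblock
        have hnew : 0 < m - (s : Int) * hit := by
          have h1 : (s : Int) ≤ c - 1 := by omega
          have h2 : (s : Int) * hit ≤ (c - 1) * hit := mul_le_mul_of_nonneg_right h1 hhit.le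
          rw [hc] at h2
          linarith
        rw [hblock]
        show (((h.set i (m - (s:Int) * hit)).filter (fun x => decide (x ≤ 0))).length : Int) = _
        rw [dead_set_pos hi (hgi ▸ hmpos) hnew]
        rw [takeKills_zero (fun y hy => lt_of_lt_of_le hsint (sorted_mem_cost_le hhit hmin y hy)), add_zero]
      · -- the weakest monster is killed after c hits
        push_neg at hsc
        set d : Int := m - c * hit with hd
        have hdnp : d ≤ 0 := by rw [hd, hc]; linarith
        set h' : List Int := h.set i d with hh'
        have hposall : ∀ jj : Nat, jj < c.toNat → 0 < m - (jj : Int) * hit := by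
          intro jj hjj
          have h1 : (jj : Int) ≤ c - 1 := by
            have : (jj : Int) < (c.toNat : Int) := by exact_mod_cast hjj
            omega
          have h2 : (jj : Int) * hit ≤ (c - 1) * hit := mul_le_mul_of_nonneg_right h1 hhit.le
          rw [hc] at h2
          linarith
        have hblock := inblock hit hhit h m i hi hgi hmpos hmin hfirst c.toNat s hsc hposall
        rw [hcast] at hblock
        -- the cost multiset of h decomposes
        have hposd := pos_decomp hi (hgi ▸ hmpos)
        have hposd' : h'.filter (fun x => decide (0 < x))
            = (h.take i).filter (fun x => decide (0 < x)) ++ (h.drop (i+1)).filter (fun x => decide (0 < x)) :=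
          pos_set_dead hi hdnp
        have hneed' : pvNeeded hit h' = pvNeeded hit h - c := by
          unfold pvNeeded
          rw [hposd', hposd, hgi]
          simp [hc, bCost]
          ring
        -- sorted costs of h = c :: sorted costs of h'
        have hsortEq : PySem.List.sorted ((h.filter (fun x => decide (0 < x))).map (bCost hit)) (fun x => x) false
            = c :: PySem.List.sorted ((h'.filter (fun x => decide (0 < x))).map (bCost hit)) (fun x => x) false := by
          apply PySem.List.sorted_id_eq_of_perm_of_pairwise
          · refine List.Perm.trans (List.Perm.cons c (PySem.List.sorted_perm ..)) ?_
            rw [hposd', hposd, hgi, List.map_append, List.map_append, List.map_cons]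
            exact List.perm_middle.symm
          · rw [List.pairwise_cons]
            refine ⟨?_, ?_⟩
            · intro y hy
              refine sorted_mem_cost_le (h := h') hhit ?_ y hy
              intro z hz
              rw [hposd'] at hz
              rcases List.mem_append.mp hz with hz | hz
              · exact hmin z (by
                  obtain ⟨hz1, hz2⟩ := List.mem_filter.mp hz
                  exact List.mem_filter.mpr ⟨List.mem_of_mem_take hz1, hz2⟩)
              · exact hmin z (by
                  obtain ⟨hz1, hz2⟩ := List.mem_filter.mp hz
                  exact List.mem_filter.mpr ⟨List.mem_of_mem_drop hz1, hz2⟩)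
            · have := PySem.List.sorted_pairwise ((h'.filter (fun x => decide (0 < x))).map (bCost hit)) (fun x => x)
              simpa using this
        have hrec := ih (s - c.toNat) (by omega) h' (by
          rw [hneed']
          have : ((s - c.toNat : Nat) : Int) = (s : Int) - c := by
            rw [Nat.cast_sub hsc, hcast]
          omega)
        rw [hblock, hrec]
        rw [hsortEq, bTakeKills, if_neg (by
          have hsint : c ≤ (s : Int) := by
            rw [← hcast]; exact_mod_cast hsc
          omega)]
        rw [show ((h'.filter (fun x => decide (x ≤ 0))).length : Int)
              = ((h.filter (fun x => decide (x ≤ 0))).length : Int) + 1 by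
            rw [hh']; exact_mod_cast dead_set_dead hi (hgi ▸ hmpos) hdnp]
        rw [show ((s - c.toNat : Nat) : Int) = (s : Int) - c by rw [Nat.cast_sub hsc, hcast]]
        ring

theorem nonpos_hit_sim (hit : Int) (hhit : hit ≤ 0) :
    ∀ (s : Nat) (h : List Int), (∃ x ∈ h, 0 < x) →
      ((pyLoopA hit s h).filter (fun x => decide (x ≤ 0))).length
        = (h.filter (fun x => decide (x ≤ 0))).length := by
  intro s
  induction s with
  | zero => intro h _; rfl
  | succ k ihk =>
      intro h hpos
      obtain ⟨x, hx, hx0⟩ := hpos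
      have hne : h.filter (fun x => decide (0 < x)) ≠ [] := by
        intro hnil
        have : x ∈ h.filter (fun x => decide (0 < x)) := List.mem_filter.mpr ⟨hx, by simpa using hx0⟩
        rw [hnil] at this
        cases this
      obtain ⟨m, i, hi, hminEq, hidx, hgi, hmpos, hmin, hfirst⟩ := extract h hne
      have hvpos : 0 < m - hit := by omega
      rw [pyLoopA_succ hit k h hminEq hidx]
      rw [ihk (h.set i (m - hit)) ⟨m - hit, by rw [set_decomp hi]; simp, hvpos⟩]
      exact dead_set_pos hi (hgi ▸ hmpos) hvpos

-- ===== VERDICT (by name: the statement is the Claim_ definition above) =====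
theorem getMaxMonsters_spec : Claim_equal_getMaxMonsters := by
  intro n hit t h_ _ hpre
  unfold Spec_getMaxMonsters getMaxMonsters getMaxMonsters_alt
  rcases hpre with ht | ⟨hhit, hneed⟩ | ⟨hhit, hpos⟩
  · have : t.toNat = 0 := by omega
    simp [this, pyLoopA, if_pos (Or.inl ht)]
  · by_cases ht : t ≤ 0
    · have : t.toNat = 0 := by
        omega
      simp [this, pyLoopA, if_pos (Or.inl ht)]
    · have htn : ((t.toNat : Int)) = t := by omega
      have := main_sim hit hhit t.toNat h_ (by rw [htn]; exact hneed)
      rw [if_neg (by push_neg; exact ⟨by omega, by omega⟩)]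
      rw [this, htn]
  · by_cases ht : t ≤ 0
    · have : t.toNat = 0 := by omega
      simp [this, pyLoopA, if_pos (Or.inl ht)]
    · rw [if_pos (Or.inr hhit)]
      exact congrArg (fun k : Nat => (k : Int)) (nonpos_hit_sim hit hhit t.toNat h_ hpos)

theorem getMaxMonsters_raises : Claim_raises_getMaxMonsters := by
  unfold Claim_raises_getMaxMonsters
  exact ⟨by
    intro n hit t h_ _ hr hpre
    rcases hr with ⟨ht, ⟨hhit, hlt⟩ | ⟨hhit, hall⟩⟩ <;>
      rcases hpre with h | ⟨h1, h2⟩ | ⟨h1, x, hx, hx2⟩ <;> first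
        | omega
        | exact absurd (hall x hx) (by omega), by decide⟩

-- self-check: B's port really returns the stated value at the raise witness
theorem getMaxMonsters_raises_ok :
    getMaxMonsters_alt pvRaiseWitness_getMaxMonsters.1 pvRaiseWitness_getMaxMonsters.2.1
      pvRaiseWitness_getMaxMonsters.2.2.1 pvRaiseWitness_getMaxMonsters.2.2.2
      = pvRaiseWitnessOut_getMaxMonsters :=
  getMaxMonsters_raises.2.2.2
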